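-- pv_equiv track=rewrite | github.com/HarshavardhanRaja/Local_Work | Python/prep/Easy/occurences_of_b_before_a.py | solve
-- ===== SOURCE A (Python) =====
-- def solve(s):
--
--     temp = False
--     for i in s:
--         if i == 'b':
--             temp = True
--         if i == 'a' and temp:
--             return False
--     return True
-- ===== SOURCE B (Python) =====
-- def solve(s):
--     t = [c for c in s if c == 'a' or c == 'b']
--     return t == ['a'] * t.count('a') + ['b'] * t.count('b')
-- ===== Notes on version B (the rewrite author's own statement) =====
-- stated objective: alternative
-- what changed: Instead of a stateful flag loop over the string, B projects the string onto the two marker characters and compares that projection against its canonical form rebuilt from character counts (all first-markers before all second-markers), which holds exactly when no violating character follows the flag character.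
import Mathlib
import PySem

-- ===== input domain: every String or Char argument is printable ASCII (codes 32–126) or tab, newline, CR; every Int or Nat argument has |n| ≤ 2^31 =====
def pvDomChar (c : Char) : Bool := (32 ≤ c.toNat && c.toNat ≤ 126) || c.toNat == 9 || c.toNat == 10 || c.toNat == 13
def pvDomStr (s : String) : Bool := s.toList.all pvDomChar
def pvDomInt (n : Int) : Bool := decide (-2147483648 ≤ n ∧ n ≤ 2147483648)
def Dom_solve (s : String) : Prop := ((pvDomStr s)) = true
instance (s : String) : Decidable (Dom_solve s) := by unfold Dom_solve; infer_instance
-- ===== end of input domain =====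

-- B replaces A's stateful flag loop by a canonical-form check: project the string onto
-- its 'a'/'b' characters and compare with the projection rebuilt from counts ('a's first).

-- ===== PORT A =====
-- the for-loop over the characters with its boolean flag `temp` and early return
def solveLoop : List Char → Bool → Bool
  | [], _ => true
  | i :: rest, temp =>
    let temp := if i == 'b' then true else temp
    if i == 'a' && temp then false else solveLoop rest temp

def solve (s : String) : Bool := solveLoop s.toList false

-- ===== PORT B =====
def solve_alt (s : String) : Bool :=
  let t := s.toList.filter (fun c => c == 'a' || c == 'b')
  t == List.replicate (t.count 'a') 'a' ++ List.replicate (t.count 'b') 'b'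

-- ===== PRECONDITION & SPEC =====
def Spec_solve (s : String) (out : Bool) : Prop := out = solve_alt s
instance (s : String) (out : Bool) : Decidable (Spec_solve s out) := by unfold Spec_solve; infer_instance

-- ===== CLAIM (what is proved, stated in full; the proofs are below) =====
def Claim_equal_solve : Prop := ∀ (s : String), Dom_solve s → Spec_solve s (solve s)

-- ===== LEMMAS AND PROOFS =====

-- once the flag is set, A returns True exactly when no 'a' remains
lemma solveLoop_true (l : List Char) : solveLoop l true = !decide ('a' ∈ l) := by
  induction l with
  | nil => simp [solveLoop]
  | cons c rest ih =>
    by_cases hc : c = 'a'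
    · simp [solveLoop, hc]
    · simp only [solveLoop, List.mem_cons, ite_self]
      have hba : (c == 'a') = false := by simp [hc]
      have hac : ('a' = c) = False := by
        simp only [eq_iff_iff, iff_false]
        exact fun h => hc h.symm
      simp [hba, ih, hac]

-- a list of 'a'/'b' characters with no 'a' is a block of 'b's
lemma eq_replicate_b (u : List Char) (hab : ∀ x ∈ u, x = 'a' ∨ x = 'b')
    (ha : 'a' ∉ u) : u = List.replicate (u.count 'b') 'b' := by
  induction u with
  | nil => simp
  | cons c rest ih =>
    have hc : c = 'b' := by
      rcases hab c (by simp) with h | h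
      · exact absurd (h ▸ List.mem_cons_self ..) ha
      · exact h
    subst hc
    have := ih (fun x hx => hab x (by simp [hx])) (fun h => ha (by simp [h]))
    simp [List.replicate_succ]
    exact this

-- the canonical-form characterisation of A's loop started with a clear flag
lemma solveLoop_false (l : List Char) :
    solveLoop l false =
      decide (l.filter (fun c => c == 'a' || c == 'b')
        = List.replicate ((l.filter (fun c => c == 'a' || c == 'b')).count 'a') 'a'
          ++ List.replicate ((l.filter (fun c => c == 'a' || c == 'b')).count 'b') 'b') := by
  induction l with
  | nil => simp [solveLoop]
  | cons c rest ih =>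
    set u := rest.filter (fun c => c == 'a' || c == 'b') with hu
    by_cases hca : c = 'a'
    · subst hca
      have hstep : solveLoop ('a' :: rest) false = solveLoop rest false := by
        simp [solveLoop]
      have hf : ('a' :: rest).filter (fun c => c == 'a' || c == 'b') = 'a' :: u := by
        simp [hu]
      rw [hstep, ih, decide_eq_decide, hf]
      have h1 : ('a' :: u).count 'a' = u.count 'a' + 1 := by simp
      have h2 : ('a' :: u).count 'b' = u.count 'b' := by
        simp
      rw [h1, h2, List.replicate_succ, List.cons_append, List.cons_eq_cons]
      simp
    · by_cases hcb : c = 'b'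
      · subst hcb
        have hstep : solveLoop ('b' :: rest) false = solveLoop rest true := by
          simp [solveLoop]
        have hf : ('b' :: rest).filter (fun c => c == 'a' || c == 'b') = 'b' :: u := by
          simp [hu]
        rw [hstep, solveLoop_true, hf]
        have hmem : ('a' ∈ rest) ↔ ('a' ∈ u) := by
          simp [hu, List.mem_filter]
        have h1 : ('b' :: u).count 'a' = u.count 'a' := by
          simp
        have h2 : ('b' :: u).count 'b' = u.count 'b' + 1 := by simp
        rw [h1, h2]
        by_cases ha : 'a' ∈ rest
        · -- flag set and an 'a' remains: A says False; canonical form starts with 'a'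
          have hpos : 0 < u.count 'a' := List.count_pos_iff.mpr (hmem.mp ha)
          have hne : ('b' :: u) ≠
              List.replicate (u.count 'a') 'a' ++ List.replicate (u.count 'b' + 1) 'b' := by
            intro h
            obtain ⟨k, hk⟩ : ∃ k, u.count 'a' = k + 1 := ⟨u.count 'a' - 1, by omega⟩
            rw [hk, List.replicate_succ, List.cons_append] at h
            exact absurd (List.cons_eq_cons.mp h).1 (by decide)
          rw [decide_eq_true ha, decide_eq_false hne]
          rfl
        · -- no 'a' remains: both sides are the all-'b' check
          have hca0 : u.count 'a' = 0 :=
            List.count_eq_zero.mpr (fun h => ha (hmem.mpr h))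
          have hab : ∀ x ∈ u, x = 'a' ∨ x = 'b' := by
            intro x hx
            have := (List.mem_filter.mp (hu ▸ hx)).2
            simpa using this
          have heq : u = List.replicate (u.count 'b') 'b' :=
            eq_replicate_b u hab (fun h => ha (hmem.mpr h))
          rw [decide_eq_false ha, hca0, List.replicate_zero, List.nil_append,
            List.replicate_succ]
          exact (decide_eq_true (by rw [← heq])).symm
      · have hstep : solveLoop (c :: rest) false = solveLoop rest false := by
          have h1 : (c == 'b') = false := by simp [hcb]
          have h2 : (c == 'a') = false := by simp [hca]
          simp [solveLoop, h1, h2]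
        rw [hstep, ih]
        have hf : (c :: rest).filter (fun c => c == 'a' || c == 'b') = u := by
          simp [hca, hcb, hu]
        rw [hf]

-- ===== VERDICT (by name: the statement is the Claim_ definition above) =====
theorem solve_spec : Claim_equal_solve := by
  intro s _
  unfold Spec_solve solve solve_alt
  rw [solveLoop_false]
  have hbe : ∀ (x y : List Char), (x == y) = decide (x = y) := by
    intro x y
    by_cases h : x = y <;> simp [h]
  rw [hbe]
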